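-- pv_equiv track=rewrite | github.com/karpix25/karpix_anton_plati | services/v1/providers/kie_ai_service.py | _pick_preferred_video_url
-- ===== SOURCE A (Python) =====
-- from typing import Any, Dict, List
--
-- VIDEO_URL_HINTS = (".mp4", ".mov", ".webm", ".m4v", ".mkv", ".avi", ".ts", ".m3u8")
--
-- IMAGE_URL_HINTS = (".jpg", ".jpeg", ".png", ".webp", ".gif", ".bmp", ".avif", ".svg")
--
-- def _pick_preferred_video_url(urls: List[str]) -> str | None:
--     normalized = [str(url or "").strip() for url in (urls or []) if str(url or "").strip()]
--     if not normalized: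
--         return None
--
--     def _looks_like_by_hints(url: str, hints: tuple[str, ...]) -> bool:
--         lower = url.lower()
--         return any(hint in lower for hint in hints)
--
--     for url in normalized:
--         if _looks_like_by_hints(url, VIDEO_URL_HINTS):
--             return url
--
--     for url in normalized:
--         if not _looks_like_by_hints(url, IMAGE_URL_HINTS):
--             return url
--
--     return normalized[0]
-- ===== SOURCE B (Python) =====
-- VIDEO_URL_HINTS = (".mp4", ".mov", ".webm", ".m4v", ".mkv", ".avi", ".ts", ".m3u8")
-- IMAGE_URL_HINTS = (".jpg", ".jpeg", ".png", ".webp", ".gif", ".bmp", ".avif", ".svg")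
--
-- def _pick_preferred_video_url(urls):
--     first_video = None
--     first_nonimage = None
--     first = None
--     for url in (urls or []):
--         s = str(url or "").strip()
--         if not s:
--             continue
--         if first is None:
--             first = s
--         low = s.lower()
--         if first_video is None and any(h in low for h in VIDEO_URL_HINTS):
--             first_video = s
--         if first_nonimage is None and not any(h in low for h in IMAGE_URL_HINTS):
--             first_nonimage = s
--     return first_video or first_nonimage or first
-- ===== Notes on version B (the rewrite author's own statement) =====
-- stated objective: alternative
-- what changed: Replaces the build-a-normalized-list plus two sequential scans with a single pass over the input that maintains three first-seen candidates (first video-hint URL, first non-image URL, first nonempty URL) and combines them at the end.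
import Mathlib
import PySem

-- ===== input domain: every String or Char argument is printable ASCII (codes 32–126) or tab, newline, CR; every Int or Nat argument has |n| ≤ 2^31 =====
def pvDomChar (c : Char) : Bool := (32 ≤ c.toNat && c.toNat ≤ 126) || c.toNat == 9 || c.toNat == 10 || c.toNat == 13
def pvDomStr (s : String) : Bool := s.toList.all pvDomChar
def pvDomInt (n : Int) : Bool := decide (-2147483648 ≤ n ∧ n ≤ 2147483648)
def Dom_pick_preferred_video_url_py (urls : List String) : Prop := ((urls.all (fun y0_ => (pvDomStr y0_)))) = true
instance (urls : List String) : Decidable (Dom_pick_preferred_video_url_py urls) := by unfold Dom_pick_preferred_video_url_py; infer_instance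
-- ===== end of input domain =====

-- B replaces A's normalized-list-then-two-scans with one pass keeping three first-seen candidates; same results, stated as exact equivalence.


-- ===== PORT A =====
def VIDEO_URL_HINTS : List String := [".mp4", ".mov", ".webm", ".m4v", ".mkv", ".avi", ".ts", ".m3u8"]
def IMAGE_URL_HINTS : List String := [".jpg", ".jpeg", ".png", ".webp", ".gif", ".bmp", ".avif", ".svg"]

-- A's inner helper: lowercase once, then any hint is a substring
def looksLikeByHints (url : String) (hints : List String) : Bool :=
  let lower := PySem.Str.lower url
  hints.any (fun hint => PySem.Str.isIn hint lower)

def pick_preferred_video_url_py (urls : List String) : Option String :=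
  -- [str(url or "").strip() for url in (urls or []) if str(url or "").strip()]
  let normalized := urls.filterMap (fun url =>
    let s := PySem.Str.strip url
    if s = "" then none else some s)
  if normalized = [] then none
  else
    match normalized.find? (fun url => looksLikeByHints url VIDEO_URL_HINTS) with
    | some url => some url
    | none =>
      match normalized.find? (fun url => ! looksLikeByHints url IMAGE_URL_HINTS) with
      | some url => some url
      | none => PySem.List.pyGet? normalized 0

-- ===== PORT B =====
-- any(h in low for h in hints), with low precomputed
def anyHintIn (low : String) (hints : List String) : Bool :=
  hints.any (fun h => PySem.Str.isIn h low)

def pickStep (st : Option String × Option String × Option String) (url : String) :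
    Option String × Option String × Option String :=
  let s := PySem.Str.strip url
  if s = "" then st
  else
    let fv := st.1
    let fn := st.2.1
    let f := st.2.2
    let f := if f.isNone then some s else f
    let low := PySem.Str.lower s
    let fv := if fv.isNone && anyHintIn low VIDEO_URL_HINTS then some s else fv
    let fn := if fn.isNone && ! anyHintIn low IMAGE_URL_HINTS then some s else fn
    (fv, fn, f)

def pick_preferred_video_url_py_alt (urls : List String) : Option String :=
  let st := urls.foldl pickStep (none, none, none)
  st.1.or (st.2.1.or st.2.2)

-- ===== PRECONDITION & SPEC =====
def Spec_pick_preferred_video_url_py (urls : List String) (out : Option String) : Prop := out = pick_preferred_video_url_py_alt urls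
instance (urls : List String) (out : Option String) : Decidable (Spec_pick_preferred_video_url_py urls out) := by unfold Spec_pick_preferred_video_url_py; infer_instance

-- ===== CLAIM (what is proved, stated in full; the proofs are below) =====
def Claim_equal_pick_preferred_video_url_py : Prop := ∀ (urls : List String), Dom_pick_preferred_video_url_py urls → Spec_pick_preferred_video_url_py urls (pick_preferred_video_url_py urls)

-- ===== LEMMAS AND PROOFS =====

-- A's two scan predicates, named for the proofs
def pV (s : String) : Bool := looksLikeByHints s VIDEO_URL_HINTS
def pN (s : String) : Bool := ! looksLikeByHints s IMAGE_URL_HINTS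

-- A's normalized list
def normList (urls : List String) : List String :=
  urls.filterMap (fun url =>
    let s := PySem.Str.strip url
    if s = "" then none else some s)

lemma normList_cons_ne (u : String) (rest : List String) (hs : PySem.Str.strip u ≠ "") :
    normList (u :: rest) = PySem.Str.strip u :: normList rest := by
  simp [normList, hs]

lemma normList_cons_eq (u : String) (rest : List String) (hs : PySem.Str.strip u = "") :
    normList (u :: rest) = normList rest := by
  simp [normList, hs]

-- the fold computes, componentwise, the first matches over the normalized list
lemma foldl_pickStep_spec (urls : List String) (fv fn f : Option String) :
    urls.foldl pickStep (fv, fn, f) =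
      (fv.or ((normList urls).find? pV),
       fn.or ((normList urls).find? pN),
       f.or (normList urls).head?) := by
  induction urls generalizing fv fn f with
  | nil => simp [normList]
  | cons u rest ih =>
    rw [List.foldl_cons]
    by_cases hs : PySem.Str.strip u = ""
    · rw [show pickStep (fv, fn, f) u = (fv, fn, f) from by simp [pickStep, hs],
        ih, normList_cons_eq u rest hs]
    · have hstep : pickStep (fv, fn, f) u =
          (if fv.isNone && pV (PySem.Str.strip u) then some (PySem.Str.strip u) else fv,
           if fn.isNone && pN (PySem.Str.strip u) then some (PySem.Str.strip u) else fn,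
           if f.isNone then some (PySem.Str.strip u) else f) := by
        simp only [pickStep, if_neg hs]; rfl
      rw [hstep, ih, normList_cons_ne u rest hs, List.find?_cons, List.find?_cons]
      refine Prod.ext ?_ (Prod.ext ?_ ?_)
      · cases fv with
        | some x => simp
        | none => cases hP : pV (PySem.Str.strip u) <;> simp [*]
      · cases fn with
        | some x => simp
        | none => cases hP : pN (PySem.Str.strip u) <;> simp [*]
      · cases f <;> simp

-- ===== VERDICT (by name: the statement is the Claim_ definition above) =====
theorem pick_preferred_video_url_py_spec : Claim_equal_pick_preferred_video_url_py := by
  intro urls _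
  show pick_preferred_video_url_py urls = pick_preferred_video_url_py_alt urls
  show (if normList urls = [] then none else
      match (normList urls).find? pV with
      | some url => some url
      | none =>
        match (normList urls).find? pN with
        | some url => some url
        | none => PySem.List.pyGet? (normList urls) 0) =
    pick_preferred_video_url_py_alt urls
  unfold pick_preferred_video_url_py_alt
  rw [foldl_pickStep_spec]
  show _ = ((Option.none.or ((normList urls).find? pV)).or
    ((Option.none.or ((normList urls).find? pN)).or (Option.none.or (normList urls).head?)))
  simp only [Option.none_or]
  cases hn : normList urls with
  | nil => simp
  | cons a l =>
    rw [if_neg (by simp)]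
    cases hv : (a :: l).find? pV with
    | some x => simp
    | none =>
      cases hi : (a :: l).find? pN with
      | some x => simp
      | none => simpa using PySem.List.pyGet?_zero_cons a l
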